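-- pv_equiv track=rewrite | github.com/JUNSEOK3759/BaekJoon_Coding_Test | 프로그래머스/unrated/152996. 시소 짝꿍/시소 짝꿍.py | solution
-- ===== SOURCE A (Python) =====
-- import itertools
--
-- def solution(a):
--     answer = 0
--     a.sort()
--     cnt = 0
--     diction = {}
--     while cnt < len(a):
--         x = a.count(a[cnt])
--         diction[a[cnt]] = x
--         if x > 1:
--             if x == 2:
--                 answer += 1
--             else:
--                 answer += x * (x-1) // 2
--             cnt += x
--         else:
--             cnt += 1
--     l, m, n = 4, 3, 2
--     a = sorted(list(set(a)))
--     for com in itertools.combinations(a, 2):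
--         q, w = com
--         if q == w:
--             continue
--         elif q * l == w * m or q * l == w * n or q * m == w * n:
--             answer += diction[q] * diction[w]
--     return answer
-- ===== SOURCE B (Python) =====
-- def solution(a):
--     cnt = {}
--     for x in a:
--         cnt[x] = cnt.get(x, 0) + 1
--     ans = 0
--     for v, c in cnt.items():
--         ans += c * (c - 1) // 2
--         for num, den in ((2, 1), (3, 2), (4, 3)):
--             if v * num % den == 0:
--                 w = v * num // den
--                 if w > v:
--                     ans += c * cnt.get(w, 0)
--     return ans
-- ===== Notes on version B (the rewrite author's own statement) =====
-- stated objective: faster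
-- what changed: A sorts the list, walks it with an index-jumping while loop plus full-list count() calls, and then scans all O(u^2) pairs of distinct values for the three torque ratios; B builds one counter dict in a single pass and, per distinct value v, directly looks up its three larger-partner candidates 2v, 3v/2, 4v/3 in the dict.
import Mathlib
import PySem

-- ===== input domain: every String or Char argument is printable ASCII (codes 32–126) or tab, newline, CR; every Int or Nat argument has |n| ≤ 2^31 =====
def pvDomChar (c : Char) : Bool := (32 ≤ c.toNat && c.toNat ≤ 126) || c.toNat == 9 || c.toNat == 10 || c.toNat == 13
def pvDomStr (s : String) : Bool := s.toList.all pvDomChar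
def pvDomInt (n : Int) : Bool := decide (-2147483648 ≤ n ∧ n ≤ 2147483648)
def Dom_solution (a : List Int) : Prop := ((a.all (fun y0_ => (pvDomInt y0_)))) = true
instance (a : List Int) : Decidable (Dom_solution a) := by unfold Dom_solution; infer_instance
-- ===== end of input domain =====

-- B replaces A's sort + pair-count while loop + O(u^2) scan over all value pairs by one
-- counter dict and, per distinct value, direct lookups of its three larger ratio partners
-- (2v, 3v/2, 4v/3): objective 'faster'. A sorts its argument in place (a.sort()); B does
-- not mutate it — the equivalence proved here is about the return value only.

-- ===== PORT A =====
-- the while loop: state (cnt, answer, diction); x = a.count(a[cnt]); cnt advances by x (or 1)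
def solutionLoop (s : List Int) (cnt : Nat) (answer : Int) (d : PySem.Dict Int Int) : Int × PySem.Dict Int Int :=
  if h : cnt < s.length then
    let v := s[cnt]
    let x : Nat := PySem.List.count s v
    let d' := d.insert v (x : Int)
    if 1 < x then
      solutionLoop s (cnt + x)
        (if x = 2 then answer + 1 else answer + PySem.Int.floordiv ((x : Int) * ((x : Int) - 1)) 2) d'
    else
      solutionLoop s (cnt + 1) answer d'
  else (answer, d)
termination_by s.length - cnt
decreasing_by
  · have hc : 0 < PySem.List.count s s[cnt] := by
      rw [PySem.List.count_eq]; exact List.count_pos_iff.mpr (List.getElem_mem h)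
    omega
  · omega

def solution (a : List Int) : Int :=
  let s := PySem.List.sorted a (fun x => x)          -- a.sort()
  let p := solutionLoop s 0 0 PySem.Dict.empty        -- the while loop
  let u := PySem.List.sorted (PySem.Set.ofList s) (fun x => x)   -- sorted(list(set(a)))
  (PySem.List.combinations u 2).foldl (fun ans com =>
    match com with
    | [q, w] =>
      if q = w then ans
      else if q * 4 = w * 3 ∨ q * 4 = w * 2 ∨ q * 3 = w * 2 then
        -- diction[q], diction[w]: KeyError impossible — the while loop inserted every distinct element
        ans + p.2.getD q 0 * p.2.getD w 0
      else ans
    | _ => ans) p.1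

-- ===== PORT B =====
def solution_alt (a : List Int) : Int :=
  let cnt : PySem.Dict Int Int :=
    a.foldl (fun d x => d.modify x 0 (fun t => t + 1)) PySem.Dict.empty   -- cnt[x] = cnt.get(x, 0) + 1
  cnt.items.foldl (fun ans vc =>
    let v := vc.1
    let c := vc.2
    let ans1 := ans + PySem.Int.floordiv (c * (c - 1)) 2
    ([((2 : Int), (1 : Int)), (3, 2), (4, 3)]).foldl (fun acc nd =>
      if PySem.Int.mod (v * nd.1) nd.2 = 0 then
        let w := PySem.Int.floordiv (v * nd.1) nd.2
        if w > v then acc + c * cnt.getD w 0 else acc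
      else acc) ans1) 0

-- ===== PRECONDITION & SPEC =====
def Spec_solution (a : List Int) (out : Int) : Prop := out = solution_alt a
instance (a : List Int) (out : Int) : Decidable (Spec_solution a out) := by unfold Spec_solution; infer_instance

-- ===== CLAIM (what is proved, stated in full; the proofs are below) =====
def Claim_equal_solution : Prop := ∀ (a : List Int), Dom_solution a → Spec_solution a (solution a)

-- ===== LEMMAS AND PROOFS =====

-- integer count of v in a, as both programs use it
def cI (a : List Int) (v : Int) : Int := (List.count v a : Int)

-- the three ratio pairs (num, den): partner of v is v*num/den
def P3 : List (Int × Int) := [(2, 1), (3, 2), (4, 3)]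

-- contribution of one ratio pair at value q, for a count function cf
def pt (cf : Int → Int) (q : Int) (nd : Int × Int) : Int :=
  if PySem.Int.mod (q * nd.1) nd.2 = 0 ∧ q < PySem.Int.floordiv (q * nd.1) nd.2 then
    cf q * cf (PySem.Int.floordiv (q * nd.1) nd.2)
  else 0

-- what A's while loop adds for a run of x equal elements
def C2 (x : Nat) : Int :=
  if 1 < x then (if x = 2 then 1 else PySem.Int.floordiv ((x : Int) * ((x : Int) - 1)) 2) else 0

-- the common value both programs compute
def G (a : List Int) (v : Int) : Int :=
  PySem.Int.floordiv (cI a v * (cI a v - 1)) 2 + (P3.map (pt (cI a) v)).sum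

theorem C2_eq (n : Nat) (h : 1 ≤ n) :
    C2 n = PySem.Int.floordiv ((n : Int) * ((n : Int) - 1)) 2 := by
  match n, h with
  | 1, _ => decide
  | 2, _ => decide
  | (k+3), _ =>
    unfold C2
    rw [if_pos (by omega), if_neg (by omega)]

-- a sorted list starting with v is a run of v's followed by a sorted rest free of v
theorem run_split (v : Int) : ∀ (r : List Int), (v :: r).Pairwise (· ≤ ·) →
    ∃ k rest, r = List.replicate k v ++ rest ∧ v ∉ rest ∧ rest.Pairwise (· ≤ ·) := by
  intro r
  induction r with
  | nil => exact fun _ => ⟨0, [], rfl, by simp, List.Pairwise.nil⟩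
  | cons b r' ih =>
    intro h
    rw [List.pairwise_cons] at h
    obtain ⟨hv, hb⟩ := h
    by_cases hbv : b = v
    · subst hbv
      obtain ⟨k, rest, hr, hnm, hp⟩ := ih (by
        rw [List.pairwise_cons]
        exact ⟨fun y hy => hv y (List.mem_cons_of_mem _ hy), hb.tail⟩)
      exact ⟨k + 1, rest, by simp [List.replicate_succ, hr], hnm, hp⟩
    · refine ⟨0, b :: r', by simp, ?_, hb⟩
      intro hvm
      rcases List.mem_cons.mp hvm with h1 | h2
      · exact hbv h1.symm
      · have h3 := (List.pairwise_cons.mp hb).1 v h2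
        have h4 := hv b (List.mem_cons_self ..)
        exact hbv (le_antisymm h3 h4)

theorem loop_spec (s : List Int) (hs : s.Pairwise (· ≤ ·)) :
    ∀ N cnt (ans : Int) (d : PySem.Dict Int Int), s.length - cnt = N → cnt ≤ s.length →
    (∀ v ∈ s.drop cnt, List.count v s = List.count v (s.drop cnt)) →
    (solutionLoop s cnt ans d).1
        = ans + ∑ v ∈ (s.drop cnt).toFinset, C2 (List.count v (s.drop cnt))
      ∧ ∀ w, (solutionLoop s cnt ans d).2.getD w 0
        = if w ∈ s.drop cnt then (List.count w s : Int) else d.getD w 0 := by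
  intro N
  induction N using Nat.strong_induction_on with
  | _ N ihN =>
    intro cnt ans d hN hle hinv
    by_cases h : cnt < s.length
    · have htc : s.drop cnt = s[cnt] :: s.drop (cnt + 1) := List.drop_eq_getElem_cons h
      have hpt : (s.drop cnt).Pairwise (· ≤ ·) := hs.sublist (List.drop_sublist _ _)
      obtain ⟨k, rest, hr, hnv, hprest⟩ := run_split s[cnt] (s.drop (cnt + 1)) (htc ▸ hpt)
      have ht : s.drop cnt = List.replicate (k + 1) s[cnt] ++ rest := by
        rw [htc, hr]; simp [List.replicate_succ]
      have hcv : List.count s[cnt] (s.drop cnt) = k + 1 := by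
        rw [ht]
        simp [List.count_append, List.count_eq_zero.mpr hnv]
      have hx : PySem.List.count s s[cnt] = k + 1 := by
        rw [PySem.List.count_eq, hinv s[cnt] (by rw [htc]; exact List.mem_cons_self ..), hcv]
      have hx' : List.count s[cnt] s = k + 1 := by rw [← PySem.List.count_eq]; exact hx
      have hlen : k + 1 ≤ s.length - cnt := by
        rw [← hcv]
        calc List.count s[cnt] (s.drop cnt) ≤ (s.drop cnt).length := List.count_le_length
          _ = s.length - cnt := List.length_drop
      have hds : s.drop (cnt + (k + 1)) = rest := by
        rw [← List.drop_drop, ht]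
        simp
      have hinv' : ∀ u ∈ s.drop (cnt + (k + 1)),
          List.count u s = List.count u (s.drop (cnt + (k + 1))) := by
        rw [hds]
        intro u hu
        have hune : u ≠ s[cnt] := fun e => hnv (e ▸ hu)
        rw [hinv u (by rw [ht]; exact List.mem_append_right _ hu), ht]
        simp [List.count_append, List.count_replicate, Ne.symm hune]
      obtain ⟨IH1, IH2⟩ := ihN (s.length - (cnt + (k + 1))) (by omega) (cnt + (k + 1))
        (ans + C2 (k + 1)) (d.insert s[cnt] ((k + 1 : Nat) : Int)) rfl (by omega) hinv'
      have hcall : solutionLoop s cnt ans d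
          = solutionLoop s (cnt + (k + 1)) (ans + C2 (k + 1)) (d.insert s[cnt] ((k + 1 : Nat) : Int)) := by
        rw [solutionLoop, dif_pos h]
        simp only [hx]
        by_cases hk : 1 < k + 1
        · rw [if_pos hk]
          congr 1
          unfold C2
          rw [if_pos hk]
          by_cases hk2 : k + 1 = 2
          · rw [if_pos hk2, if_pos hk2]
          · rw [if_neg hk2, if_neg hk2]
        · rw [if_neg hk]
          have hk0 : k = 0 := by omega
          subst hk0
          rw [show C2 1 = 0 from rfl, add_zero]
      rw [hcall]
      constructor
      · rw [IH1, hds]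
        have htf : (s.drop cnt).toFinset = insert s[cnt] rest.toFinset := by
          ext y
          simp only [List.mem_toFinset, ht, List.mem_append, List.mem_replicate,
            Finset.mem_insert, List.mem_toFinset]
          constructor
          · rintro (⟨-, rfl⟩ | hy)
            · exact Or.inl rfl
            · exact Or.inr hy
          · rintro (rfl | hy)
            · exact Or.inl ⟨by omega, rfl⟩
            · exact Or.inr hy
        rw [htf, Finset.sum_insert (by simpa using hnv), hcv]
        have hcr : ∀ y ∈ rest.toFinset,
            C2 (List.count y (s.drop cnt)) = C2 (List.count y rest) := by
          intro y hy
          have hyne : y ≠ s[cnt] := fun e => hnv (e ▸ List.mem_toFinset.mp hy)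
          rw [ht]
          simp [List.count_append, List.count_replicate, Ne.symm hyne]
        rw [Finset.sum_congr rfl hcr]
        ring
      · intro w
        rw [IH2 w, hds, PySem.Dict.getD_insert]
        by_cases hwr : w ∈ rest
        · rw [if_pos hwr, if_pos (by rw [ht]; exact List.mem_append_right _ hwr)]
        · rw [if_neg hwr]
          by_cases hwv : w = s[cnt]
          · subst hwv
            rw [if_pos rfl, if_pos (by rw [htc]; exact List.mem_cons_self ..), hx']
          · rw [if_neg hwv, if_neg (by
              rw [ht]
              simp only [List.mem_append, List.mem_replicate]
              rintro (⟨-, h⟩ | h)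
              · exact hwv h
              · exact hwr h)]
    · have hcnt : s.drop cnt = [] := List.drop_eq_nil_of_le (not_lt.mp h)
      rw [solutionLoop, dif_neg h]
      constructor
      · rw [hcnt]; simp
      · intro w; rw [hcnt]; simp

theorem comb1 (xs : List Int) : PySem.List.combinations xs 1 = xs.map ([·]) := by
  induction xs with
  | nil => rfl
  | cons b bs ih => simp [PySem.List.combinations, ih]

theorem comb2 (x : Int) (xs : List Int) :
    PySem.List.combinations (x :: xs) 2 = (xs.map fun y => [x, y]) ++ PySem.List.combinations xs 2 := by
  simp [PySem.List.combinations, comb1]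

theorem mem_comb2 : ∀ (u : List Int) com, com ∈ PySem.List.combinations u 2 →
    ∃ q w, com = [q, w] ∧ q ∈ u ∧ w ∈ u := by
  intro u
  induction u with
  | nil => intro com h; simp [PySem.List.combinations] at h
  | cons x xs ih =>
    intro com h
    rw [comb2, List.mem_append] at h
    rcases h with h | h
    · obtain ⟨y, hy, rfl⟩ := List.mem_map.mp h
      exact ⟨x, y, rfl, List.mem_cons_self .., List.mem_cons_of_mem _ hy⟩
    · obtain ⟨q, w, rfl, hq, hw⟩ := ih com h
      exact ⟨q, w, rfl, List.mem_cons_of_mem _ hq, List.mem_cons_of_mem _ hw⟩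

theorem ite_or_split (q w X : Int) (hqw : q < w) :
    (if q * 4 = w * 3 ∨ q * 4 = w * 2 ∨ q * 3 = w * 2 then X else 0)
      = (if q * 2 = w * 1 then X else 0) + ((if q * 3 = w * 2 then X else 0)
        + ((if q * 4 = w * 3 then X else 0) + 0)) := by
  split_ifs <;> first | (exfalso; omega) | ring

theorem pair_sum (cf : Int → Int) (q num den : Int) (hden : 0 < den)
    (T : List Int) (hnd : T.Nodup) (hgt : ∀ w ∈ T, q < w)
    (hz : ∀ w, q < w → w ∉ T → cf w = 0) :
    (T.map (fun w => if q * num = w * den then cf q * cf w else 0)).sum = pt cf q (num, den) := by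
  by_cases hd : den ∣ q * num
  · have hw0 : PySem.Int.floordiv (q * num) den * den = q * num := by
      rw [PySem.Int.floordiv_eq_ediv_of_pos hden]; exact Int.ediv_mul_cancel hd
    generalize hw0def : PySem.Int.floordiv (q * num) den = w0 at *
    have hiff : ∀ w : Int, (q * num = w * den) ↔ w = w0 := by
      intro w
      constructor
      · intro hwe
        exact mul_right_cancel₀ (by omega) (hwe ▸ hw0).symm
      · rintro rfl; exact hw0.symm
    simp only [hiff]
    rw [← List.sum_toFinset _ hnd, Finset.sum_ite_eq' T.toFinset w0 (fun w => cf q * cf w)]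
    unfold pt
    simp only [PySem.Int.mod_eq_zero_iff_dvd, List.mem_toFinset, hw0def]
    by_cases hmem : w0 ∈ T
    · rw [if_pos hmem, if_pos ⟨hd, hgt w0 hmem⟩]
    · rw [if_neg hmem]
      by_cases hlt : q < w0
      · rw [if_pos ⟨hd, hlt⟩, hz w0 hlt hmem, mul_zero]
      · rw [if_neg (fun hc => hlt hc.2)]
  · have h0 : (T.map (fun w => if q * num = w * den then cf q * cf w else 0)).sum = 0 := by
      apply List.sum_eq_zero
      intro x hx
      obtain ⟨w, hw, rfl⟩ := List.mem_map.mp hx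
      rw [if_neg]
      intro he
      exact hd ⟨w, by linarith⟩
    rw [h0]
    unfold pt
    rw [if_neg]
    intro hc
    exact hd ((PySem.Int.mod_eq_zero_iff_dvd _ _).mp hc.1)

theorem innerSum3 (cf : Int → Int) (q : Int) (T : List Int) (hnd : T.Nodup)
    (hgt : ∀ w ∈ T, q < w) (hz : ∀ w, q < w → w ∉ T → cf w = 0) :
    (T.map (fun w => if q * 4 = w * 3 ∨ q * 4 = w * 2 ∨ q * 3 = w * 2 then cf q * cf w else 0)).sum
      = (P3.map (pt cf q)).sum := by
  rw [List.map_congr_left (fun w hw => ite_or_split q w (cf q * cf w) (hgt w hw))]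
  rw [PySem.List.sum_map_add_int, PySem.List.sum_map_add_int, PySem.List.sum_map_add_int]
  have e1 := pair_sum cf q 2 1 (by norm_num) T hnd hgt hz
  have e2 := pair_sum cf q 3 2 (by norm_num) T hnd hgt hz
  have e3 := pair_sum cf q 4 3 (by norm_num) T hnd hgt hz
  simp only [P3, List.map_cons, List.map_nil, List.sum_cons, List.sum_nil]
  rw [e1, e2, e3]
  simp

theorem combfold (cf : Int → Int) : ∀ (u : List Int), u.Pairwise (· < ·) →
    (∀ w, cf w ≠ 0 → w ∉ u → ∀ y ∈ u, w < y) → ∀ (ans : Int),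
    (PySem.List.combinations u 2).foldl (fun ans com =>
      match com with
      | [q, w] =>
        if q = w then ans
        else if q * 4 = w * 3 ∨ q * 4 = w * 2 ∨ q * 3 = w * 2 then ans + cf q * cf w
        else ans
      | _ => ans) ans
      = ans + (u.map (fun q => (P3.map (pt cf q)).sum)).sum := by
  intro u
  induction u with
  | nil =>
    intro _ _ ans
    simp [PySem.List.combinations]
  | cons q T ih =>
    intro hp hz ans
    rw [List.pairwise_cons] at hp
    obtain ⟨hgt, hpT⟩ := hp
    have hnd : T.Nodup := hpT.imp ne_of_lt
    have hzT : ∀ w, q < w → w ∉ T → cf w = 0 := by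
      intro w hqw hwT
      by_contra hcf
      rcases List.mem_cons.mp ((em (w ∈ q :: T)).resolve_right
        (fun hn => absurd (hz w hcf hn q (List.mem_cons_self ..)) (by omega))) with h | h
      · omega
      · exact hwT h
    have hinvT : ∀ w, cf w ≠ 0 → w ∉ T → ∀ y ∈ T, w < y := by
      intro w hcf hwT y hy
      by_cases hwq : w = q
      · exact hwq ▸ hgt y hy
      · exact hz w hcf (by simp [hwq, hwT]) y (List.mem_cons_of_mem _ hy)
    rw [comb2, List.foldl_append, List.foldl_map]
    have hfst : List.foldl (fun ans y =>
        if q = y then ans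
        else if q * 4 = y * 3 ∨ q * 4 = y * 2 ∨ q * 3 = y * 2 then ans + cf q * cf y
        else ans) ans T
        = ans + (P3.map (pt cf q)).sum := by
      rw [List.foldl_ext _ (fun ans y => ans +
          (if q * 4 = y * 3 ∨ q * 4 = y * 2 ∨ q * 3 = y * 2 then cf q * cf y else 0)) ans
        (by
          intro acc y hy
          dsimp only
          rw [if_neg (ne_of_lt (hgt y hy))]
          split_ifs <;> omega)]
      rw [PySem.List.foldl_add]
      rw [innerSum3 cf q T hnd hgt hzT]
    rw [hfst, ih hpT hinvT]
    simp [add_assoc]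

theorem A_eq (a : List Int) : solution a = ∑ v ∈ a.toFinset, G a v := by
  unfold solution
  have hperm : (PySem.List.sorted a (fun x => x)).Perm a := PySem.List.sorted_perm a _ _
  have hsp : (PySem.List.sorted a (fun x => x)).Pairwise (· ≤ ·) := by
    simpa using PySem.List.sorted_pairwise a (fun x => x)
  obtain ⟨h1, h2⟩ := loop_spec (PySem.List.sorted a (fun x => x)) hsp
    (PySem.List.sorted a (fun x => x)).length 0 0 PySem.Dict.empty rfl (Nat.zero_le _)
    (by simp)
  simp only [List.drop_zero] at h1 h2
  have hdict : ∀ w, (solutionLoop (PySem.List.sorted a (fun x => x)) 0 0 PySem.Dict.empty).2.getD w 0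
      = cI a w := by
    intro w
    rw [h2 w]
    by_cases hw : w ∈ PySem.List.sorted a (fun x => x)
    · rw [if_pos hw, hperm.count_eq]; rfl
    · rw [if_neg hw]
      have : List.count w a = 0 := List.count_eq_zero.mpr (fun hc => hw (hperm.mem_iff.mpr hc))
      simp [cI, this]
  have huperm : (PySem.List.sorted (PySem.Set.ofList (PySem.List.sorted a (fun x => x))) (fun x => x)).Perm
      (PySem.Set.ofList (PySem.List.sorted a (fun x => x))) := PySem.List.sorted_perm _ _ _
  have hund : (PySem.List.sorted (PySem.Set.ofList (PySem.List.sorted a (fun x => x))) (fun x => x)).Nodup :=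
    huperm.nodup_iff.mpr (PySem.Set.nodup_ofList _)
  have hmemu : ∀ y, y ∈ PySem.List.sorted (PySem.Set.ofList (PySem.List.sorted a (fun x => x))) (fun x => x)
      ↔ y ∈ a := by
    intro y
    rw [huperm.mem_iff, PySem.Set.mem_ofList, hperm.mem_iff]
  have hup : (PySem.List.sorted (PySem.Set.ofList (PySem.List.sorted a (fun x => x))) (fun x => x)).Pairwise
      (· < ·) := by
    have hle : (PySem.List.sorted (PySem.Set.ofList (PySem.List.sorted a (fun x => x))) (fun x => x)).Pairwise
        (· ≤ ·) := by simpa using PySem.List.sorted_pairwise _ (fun x => x)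
    exact (hle.and hund).imp (fun h => lt_of_le_of_ne h.1 h.2)
  rw [List.foldl_ext _ (fun ans com =>
      match com with
      | [q, w] =>
        if q = w then ans
        else if q * 4 = w * 3 ∨ q * 4 = w * 2 ∨ q * 3 = w * 2 then ans + cI a q * cI a w
        else ans
      | _ => ans) _
    (by
      intro acc com hcom
      obtain ⟨q, w, rfl, hq, hw⟩ := mem_comb2 _ com hcom
      dsimp only
      rw [hdict q, hdict w])]
  rw [combfold (cI a) _ hup
    (by
      intro w hw hwu y _
      exfalso
      apply hwu
      apply (hmemu w).mpr
      have hcw : List.count w a ≠ 0 := by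
        intro h0
        exact hw (by simp [cI, h0])
      exact List.count_pos_iff.mp (Nat.pos_of_ne_zero hcw))]
  rw [h1, zero_add]
  have hsum2 : ((PySem.List.sorted (PySem.Set.ofList (PySem.List.sorted a (fun x => x))) (fun x => x)).map
      (fun q => (P3.map (pt (cI a) q)).sum)).sum = ∑ v ∈ a.toFinset, (P3.map (pt (cI a) v)).sum := by
    rw [← List.sum_toFinset _ hund]
    apply Finset.sum_congr
    · ext y; simp [List.mem_toFinset, hmemu]
    · intros; rfl
  have hsum1 : ∑ v ∈ (PySem.List.sorted a (fun x => x)).toFinset,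
      C2 (List.count v (PySem.List.sorted a (fun x => x)))
      = ∑ v ∈ a.toFinset, PySem.Int.floordiv (cI a v * (cI a v - 1)) 2 := by
    apply Finset.sum_congr
    · ext y; simp [List.mem_toFinset, hperm.mem_iff]
    · intro v hv
      rw [hperm.count_eq]
      have hc1 : 1 ≤ List.count v a :=
        List.count_pos_iff.mpr (List.mem_toFinset.mp (by
          simpa [List.mem_toFinset, hperm.mem_iff] using hv))
      rw [C2_eq _ hc1]
      rfl
  rw [hsum2, hsum1, ← Finset.sum_add_distrib]
  exact Finset.sum_congr rfl (fun v _ => rfl)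

theorem ite_step (c1 c2 : Prop) [Decidable c1] [Decidable c2] (acc t : Int) :
    (if c1 then (if c2 then acc + t else acc) else acc)
      = acc + (if c1 then (if c2 then t else 0) else 0) := by
  split_ifs <;> omega

theorem B_eq (a : List Int) : solution_alt a = ∑ v ∈ a.toFinset, G a v := by
  have hB : solution_alt a = (PySem.Dict.counter a).items.foldl (fun ans vc =>
      List.foldl (fun acc nd =>
        if PySem.Int.mod (vc.1 * nd.1) nd.2 = 0 then
          if PySem.Int.floordiv (vc.1 * nd.1) nd.2 > vc.1 then
            acc + vc.2 * (PySem.Dict.counter a).getD (PySem.Int.floordiv (vc.1 * nd.1) nd.2) 0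
          else acc
        else acc) (ans + PySem.Int.floordiv (vc.2 * (vc.2 - 1)) 2)
        [((2 : Int), (1 : Int)), (3, 2), (4, 3)]) 0 := rfl
  rw [hB]
  rw [PySem.Dict.items_counter, List.foldl_map]
  rw [List.foldl_ext _ (fun ans k => ans + G a k) _
    (by
      intro acc k _
      dsimp only
      simp only [List.foldl_cons, List.foldl_nil]
      rw [ite_step, ite_step, ite_step]
      simp only [PySem.Dict.getD_counter]
      unfold G pt P3 cI
      simp only [List.map_cons, List.map_nil, List.sum_cons, List.sum_nil, ite_and]
      ring)]
  rw [PySem.List.foldl_add, zero_add, ← List.sum_toFinset _ (PySem.Set.nodup_ofList a)]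
  apply Finset.sum_congr
  · ext y; simp [List.mem_toFinset, PySem.Set.mem_ofList]
  · intros; rfl

-- ===== VERDICT (by name: the statement is the Claim_ definition above) =====
theorem solution_spec : Claim_equal_solution := by
  intro a _
  unfold Spec_solution
  rw [A_eq, B_eq]
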